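-- pv_equiv track=rewrite | github.com/C2SP/wycheproof | src/xdh_analyze.py | array_to_int
-- ===== SOURCE A (Python) =====
-- from typing import List
--
-- def array_to_int(array: List[int]) -> int:
--   res = 0
--   for i in range(10):
--     exp = 51 * (i // 2)
--     if i % 2 == 1:
--       exp += 26
--     res += array[i] << exp
--   return res
-- ===== SOURCE B (Python) =====
-- from typing import List
--
-- def array_to_int(array: List[int]) -> int:
--   # Horner's method: fold from the top limb down, shifting by the gap
--   # between consecutive limb positions (26 below an even index, 25 below an odd one).
--   res = 0
--   for i in range(9, -1, -1):
--     res = (res << (26 if i % 2 == 0 else 25)) + array[i]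
--   return res
-- ===== Notes on version B (the rewrite author's own statement) =====
-- stated objective: alternative
-- what changed: Replaces per-limb absolute exponent computation (51*(i//2)+26 and a shift by up to 230 bits per term) with Horner's method folding from limb 9 down, shifting the accumulator by the 26/25-bit gap between consecutive limbs.
import Mathlib
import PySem

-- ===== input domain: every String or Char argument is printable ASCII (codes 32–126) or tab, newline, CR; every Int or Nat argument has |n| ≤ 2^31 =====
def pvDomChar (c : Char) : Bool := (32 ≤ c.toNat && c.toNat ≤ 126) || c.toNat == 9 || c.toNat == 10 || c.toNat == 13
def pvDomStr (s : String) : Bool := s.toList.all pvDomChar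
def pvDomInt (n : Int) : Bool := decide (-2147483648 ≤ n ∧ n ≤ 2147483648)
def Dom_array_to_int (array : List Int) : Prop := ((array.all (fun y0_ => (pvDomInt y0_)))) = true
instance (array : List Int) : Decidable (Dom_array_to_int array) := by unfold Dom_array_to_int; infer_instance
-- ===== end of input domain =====

-- B builds the same integer by Horner's method (fold from limb 9 down, shifting by the
-- inter-limb gap) instead of computing an absolute exponent per limb.

-- ===== PORT A =====
def array_to_int (array : List Int) : Int :=
  (PySem.List.pyRange 0 10 1).foldl
    (fun res i =>
      let exp := 51 * (PySem.Int.floordiv i 2)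
      let exp := if PySem.Int.mod i 2 = 1 then exp + 26 else exp
      res + ((PySem.List.pyGet? array i).getD 0) * 2 ^ exp.toNat)
    0

-- ===== PORT B =====
def array_to_int_alt (array : List Int) : Int :=
  (PySem.List.pyRange 9 (-1) (-1)).foldl
    (fun res i =>
      res * 2 ^ (if PySem.Int.mod i 2 = 0 then 26 else 25) + (PySem.List.pyGet? array i).getD 0)
    0

-- ===== PRECONDITION & SPEC =====
-- Pre_ excludes lists with fewer than 10 elements, on which both Pythons raise IndexError.
def Pre_array_to_int (array : List Int) : Prop := 10 ≤ array.length
instance (array : List Int) : Decidable (Pre_array_to_int array) := by unfold Pre_array_to_int; infer_instance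
def pvWitness_array_to_int : List Int := [1, 2, 3, 4, 5, 6, 7, 8, 9, 10]
def Spec_array_to_int (array : List Int) (out : Int) : Prop := out = array_to_int_alt array
instance (array : List Int) (out : Int) : Decidable (Spec_array_to_int array out) := by unfold Spec_array_to_int; infer_instance

-- ===== CLAIM (what is proved, stated in full; the proofs are below) =====
def Claim_equal_array_to_int : Prop := ∀ (array : List Int), Dom_array_to_int array → Pre_array_to_int array → Spec_array_to_int array (array_to_int array)

-- ===== LEMMAS AND PROOFS =====

theorem key (a0 a1 a2 a3 a4 a5 a6 a7 a8 a9 : Int) (rest : List Int) :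
    array_to_int (a0::a1::a2::a3::a4::a5::a6::a7::a8::a9::rest)
      = array_to_int_alt (a0::a1::a2::a3::a4::a5::a6::a7::a8::a9::rest) := by
  have hA : PySem.List.pyRange 0 10 1 = [0,1,2,3,4,5,6,7,8,9] := by decide
  have hB : PySem.List.pyRange 9 (-1) (-1) = [9,8,7,6,5,4,3,2,1,0] := by decide
  simp [array_to_int, array_to_int_alt, hA, hB, List.foldl,
    PySem.List.pyGet?, PySem.List.pyIdx?, PySem.Int.mod, PySem.Int.floordiv]
  ring

-- ===== VERDICT (by name: the statement is the Claim_ definition above) =====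
theorem array_to_int_spec : Claim_equal_array_to_int := by
  intro array _ hpre
  unfold Spec_array_to_int
  match array, hpre with
  | a0::a1::a2::a3::a4::a5::a6::a7::a8::a9::rest, _ => exact key a0 a1 a2 a3 a4 a5 a6 a7 a8 a9 rest
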